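-- pv_equiv track=rewrite | github.com/Gabrielkaos/CatalinaTransformers | CATALINA_MODELS/NEXTTOKEN/DIalog-Small/data_cleaning2.py | build_sliding_dialogue
-- ===== SOURCE A (Python) =====
-- def build_sliding_dialogue(dialog):
--     samples = []
--
--     for end in range(2, len(dialog) + 1):
--         convo = []
--         for i in range(end):
--             speaker = "Person1" if i % 2 == 0 else "Person2"
--             convo.append(f"{speaker}: {dialog[i]}")
--         samples.append("\n".join(convo))
--
--     return samples
-- ===== SOURCE B (Python) =====
-- def _line(i, d):
--     return f"{'Person1' if i % 2 == 0 else 'Person2'}: {d}"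
--
--
-- def build_sliding_dialogue(dialog):
--     samples = []
--     prefix = None
--     for i, d in enumerate(dialog):
--         line = _line(i, d)
--         prefix = line if prefix is None else prefix + "\n" + line
--         if i >= 1:
--             samples.append(prefix)
--     return samples
-- ===== Notes on version B (the rewrite author's own statement) =====
-- stated objective: alternative
-- what changed: Replaces the nested per-end rebuild (re-formatting and re-joining every prefix from scratch) by a single pass that formats each line once and grows one cumulative prefix string, emitting it from the second line on.
import Mathlib
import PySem

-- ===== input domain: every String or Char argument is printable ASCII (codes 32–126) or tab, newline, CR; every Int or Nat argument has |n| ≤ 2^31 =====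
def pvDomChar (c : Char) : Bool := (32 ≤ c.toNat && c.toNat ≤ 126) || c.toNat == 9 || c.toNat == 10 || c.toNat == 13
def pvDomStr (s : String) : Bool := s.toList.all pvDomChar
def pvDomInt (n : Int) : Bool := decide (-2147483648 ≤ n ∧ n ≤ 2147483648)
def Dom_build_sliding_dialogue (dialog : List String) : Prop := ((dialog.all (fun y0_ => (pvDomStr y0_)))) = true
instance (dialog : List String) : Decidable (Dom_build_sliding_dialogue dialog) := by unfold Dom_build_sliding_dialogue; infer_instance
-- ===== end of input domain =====

-- ===== PORT A =====
-- B replaces A's nested per-end rebuild by a single pass growing one cumulative prefix string (alternative decomposition; return values proved equal).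
def build_sliding_dialogue (dialog : List String) : List String :=
  (PySem.List.pyRange 2 ((PySem.List.len dialog) + 1) 1).foldl
    (fun samples e =>
      let convo := (PySem.List.pyRange 0 e 1).foldl
        (fun convo i =>
          let speaker := if PySem.Int.mod i 2 = 0 then "Person1" else "Person2"
          convo ++ [speaker ++ ": " ++ PySem.List.pyGetD dialog i ""]) []
      samples ++ [PySem.Str.join "\n" convo]) []

-- ===== PORT B =====
-- helper _line from Source B
def bsdLine (i : Int) (d : String) : String :=
  (if PySem.Int.mod i 2 = 0 then "Person1" else "Person2") ++ ": " ++ d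

def build_sliding_dialogue_alt (dialog : List String) : List String :=
  ((PySem.List.enumerate dialog).foldl
    (fun (st : List String × Option String) p =>
      let line := bsdLine p.1 p.2
      let pre :=
        match st.2 with
        | none => line
        | some q => q ++ "\n" ++ line
      (if 1 ≤ p.1 then st.1 ++ [pre] else st.1, some pre))
    ([], none)).1
-- ===== PRECONDITION & SPEC =====
def Spec_build_sliding_dialogue (dialog : List String) (out : List String) : Prop := out = build_sliding_dialogue_alt dialog
instance (dialog : List String) (out : List String) : Decidable (Spec_build_sliding_dialogue dialog out) := by unfold Spec_build_sliding_dialogue; infer_instance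

-- ===== CLAIM (what is proved, stated in full; the proofs are below) =====
def Claim_equal_build_sliding_dialogue : Prop := ∀ (dialog : List String), Dom_build_sliding_dialogue dialog → Spec_build_sliding_dialogue dialog (build_sliding_dialogue dialog)

-- ===== LEMMAS AND PROOFS =====

-- ===== VERDICT (by name: the statement is the Claim_ definition above) =====
-- proof-only helpers
def bsdLines (dialog : List String) : List String :=
  (PySem.List.enumerate dialog).map (fun p => bsdLine p.1 p.2)

def bsdJ (dialog : List String) : String :=
  PySem.Str.join "\n" (bsdLines dialog)

theorem bsd_str_eq_of_toList {s t : String} (h : s.toList = t.toList) : s = t := by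
  have := congrArg String.ofList h
  simpa using this

theorem bsd_chars_join_append_singleton (sep p : List Char)
    (ps : List (List Char)) (h : ps ≠ []) :
    PySem.Chars.join sep (ps ++ [p]) = PySem.Chars.join sep ps ++ sep ++ p := by
  obtain ⟨x, xs, rfl⟩ := List.exists_cons_of_ne_nil h
  induction xs generalizing x with
  | nil => simp [PySem.Chars.join, List.intercalate]
  | cons y ys ih =>
      rw [List.cons_append, List.cons_append, PySem.Chars.join_cons_cons,
        ← List.cons_append, ih y (by simp), PySem.Chars.join_cons_cons]
      simp [List.append_assoc]

theorem bsd_join_singleton (sep l : String) : PySem.Str.join sep [l] = l := by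
  apply bsd_str_eq_of_toList
  simp [PySem.Str.join, PySem.Chars.join, List.intercalate]

theorem bsd_join_append_singleton (sep l : String) (ls : List String) (h : ls ≠ []) :
    PySem.Str.join sep (ls ++ [l]) = PySem.Str.join sep ls ++ sep ++ l := by
  obtain ⟨x, xs, rfl⟩ := List.exists_cons_of_ne_nil h
  apply bsd_str_eq_of_toList
  simp only [PySem.Str.join]
  rw [List.map_append, show List.map String.toList [l] = [l.toList] from rfl,
    bsd_chars_join_append_singleton _ _ _ (by simp)]
  simp

theorem bsd_A_eq_map (dialog : List String) :
    build_sliding_dialogue dialog =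
      (PySem.List.pyRange 2 ((PySem.List.len dialog) + 1) 1).map
        (fun e => PySem.Str.join "\n" ((PySem.List.pyRange 0 e 1).map
          (fun i => bsdLine i (PySem.List.pyGetD dialog i "")))) := by
  simp only [build_sliding_dialogue, bsdLine, PySem.List.foldl_append_singleton_eq_map,
    List.nil_append]

theorem bsd_lines_eq (dialog : List String) :
    bsdLines dialog = (PySem.List.pyRange 0 (PySem.List.len dialog) 1).map
      (fun j => bsdLine j (PySem.List.pyGetD dialog j "")) := by
  simp [bsdLines, PySem.List.enumerate_eq_map_pyRange dialog "", List.map_map]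

theorem bsd_lines_append_singleton (xs : List String) (x : String) :
    bsdLines (xs ++ [x]) = bsdLines xs ++ [bsdLine (xs.length : Int) x] := by
  simp [bsdLines, PySem.List.enumerate_append]

theorem bsd_A_nil : build_sliding_dialogue [] = [] := by
  simp [build_sliding_dialogue, PySem.List.len, PySem.List.pyRange_one_eq_nil (by norm_num : (1:Int) ≤ 2)]

theorem bsd_A_singleton (x : String) : build_sliding_dialogue [x] = [] := by
  simp [build_sliding_dialogue, PySem.List.len]

theorem bsd_A_append (xs : List String) (x : String) (h : xs ≠ []) :
    build_sliding_dialogue (xs ++ [x]) = build_sliding_dialogue xs ++ [bsdJ (xs ++ [x])] := by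
  have hn : 0 < xs.length := List.length_pos_of_ne_nil h
  rw [bsd_A_eq_map, bsd_A_eq_map]
  have hlen : PySem.List.len (xs ++ [x]) = (xs.length : Int) + 1 := by
    simp [PySem.List.len]
  rw [hlen]
  rw [show ((xs.length : Int) + 1 + 1) = ((xs.length : Int) + 1) + 1 from rfl]
  rw [PySem.List.pyRange_one_succ_right (by exact_mod_cast by omega : (2:Int) ≤ (xs.length : Int) + 1)]
  rw [List.map_append]
  congr 1
  · rw [show PySem.List.len xs = (xs.length : Int) from by simp [PySem.List.len]]
    apply List.map_congr_left
    intro e he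
    rw [PySem.List.mem_pyRange_one] at he
    congr 1
    apply List.map_congr_left
    intro i hi
    rw [PySem.List.mem_pyRange_one] at hi
    have hi1 : i < (xs.length : Int) := by omega
    congr 1
    rw [PySem.List.pyGetD_eq_getElem _ _ hi.1 (by simp; omega),
        PySem.List.pyGetD_eq_getElem _ _ hi.1 (by exact_mod_cast hi1)]
    exact List.getElem_append_left (by omega)
  · simp only [List.map_cons, List.map_nil]
    congr 1
    rw [bsdJ, bsd_lines_eq, hlen]

theorem bsd_fold_inv (dialog : List String) :
    (PySem.List.enumerate dialog).foldl
      (fun (st : List String × Option String) p =>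
        let line := bsdLine p.1 p.2
        let pre :=
          match st.2 with
          | none => line
          | some q => q ++ "\n" ++ line
        (if 1 ≤ p.1 then st.1 ++ [pre] else st.1, some pre))
      ([], none)
    = (build_sliding_dialogue dialog,
       if dialog.isEmpty then none else some (bsdJ dialog)) := by
  induction dialog using List.reverseRecOn with
  | nil => simp [PySem.List.enumerate, bsd_A_nil]
  | append_singleton xs x ih =>
      rw [PySem.List.enumerate_append, List.foldl_append, ih]
      rcases List.eq_nil_or_concat' xs with rfl | hne
      · simp [PySem.List.enumerate, bsd_A_singleton, bsd_A_nil, bsdJ, bsdLines, bsd_join_singleton]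
      · have hxs : xs ≠ [] := by rcases hne with ⟨ys, y, rfl⟩; simp
        have hn : 1 ≤ xs.length := List.length_pos_of_ne_nil hxs
        have hn : 0 < xs.length := List.length_pos_of_ne_nil hxs
        have hln : bsdLines xs ≠ [] := by
          have hl : (bsdLines xs).length = xs.length := by
            simp [bsdLines, PySem.List.length_enumerate]
          intro hc
          rw [hc] at hl
          simp at hl
          omega
        have hife : (xs.isEmpty) = false := by simp [hxs]
        rw [hife]
        have hen : PySem.List.enumerate [x] (0 + (xs.length : Int)) = [((xs.length : Int), x)] := by
          simp [PySem.List.enumerate]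
        rw [hen]
        simp only [List.foldl_cons, List.foldl_nil]
        have hpre : bsdJ xs ++ "\n" ++ bsdLine (xs.length : Int) x = bsdJ (xs ++ [x]) := by
          rw [bsdJ, bsdJ, bsd_lines_append_singleton,
            bsd_join_append_singleton _ _ _ hln]
        have hcond : (1 ≤ ((xs.length : Int))) = True := by
          simp; omega
        simp only [hcond, if_true]
        rw [bsd_A_append xs x hxs]
        simp
        exact hpre
  


-- ===== VERDICT =====
theorem build_sliding_dialogue_spec : Claim_equal_build_sliding_dialogue := by
  intro dialog _
  unfold Spec_build_sliding_dialogue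
  rw [build_sliding_dialogue_alt, bsd_fold_inv]
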